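-- pv_equiv track=rewrite | github.com/jebreimo/SublimeCppMacros | cppgetsetmaker.py | splitNameString
-- ===== SOURCE A (Python) =====
-- def findEndOfTepmplateSpec(line, startPos):
--     i = startPos + 1
--     n = len(line)
--     count = 1
--     while i < n:
--         if line[i] == "<":
--             count += 1
--         elif line[i] == ">":
--             count -= 1
--             if count == 0:
--                 return i + 1
--         i += 1
--     return -1
--
-- def splitNameString(line):
--     parts = []
--     count = 0
--     n = len(line)
--     i = start = 1
--     while i < n:
--         if line[i] == "<":
--             if start != i:
--                 parts.append(line[start:i])
--             inext = findEndOfTepmplateSpec(line, i)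
--             if inext == -1:
--                 return parts
--             parts.append(line[i:inext])
--             i = start = inext
--         else:
--             i += 1
--     if start != n:
--         parts.append(line[start:])
--     return parts
-- ===== SOURCE B (Python) =====
-- def splitNameString(line):
--     # Phase 1: pair up angle brackets with a stack of '<' positions and record
--     # the top-level template spans (a, b) in order of completion.
--     n = len(line)
--     stack = []
--     spans = []
--     for i in range(1, n):
--         c = line[i]
--         if c == "<":
--             stack.append(i)
--         elif c == ">" and stack:
--             a = stack.pop()
--             if not stack:
--                 spans.append((a, i + 1))
--     # Phase 2: rebuild the pieces from the recorded spans.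
--     parts = []
--     start = 1
--     for a, b in spans:
--         if start != a:
--             parts.append(line[start:a])
--         parts.append(line[a:b])
--         start = b
--     if stack:
--         # unterminated template: keep any text before its first '<', drop the rest
--         p = stack[0]
--         if start != p:
--             parts.append(line[start:p])
--     elif start != n:
--         parts.append(line[start:])
--     return parts
-- ===== Notes on version B (the rewrite author's own statement) =====
-- stated objective: alternative
-- what changed: Replaced the on-the-fly nested scan (outer loop calling findEndOfTepmplateSpec and emitting pieces as it goes) with two staged passes: a bracket-pairing pass using an explicit stack of opening-bracket positions that records the top-level template spans, followed by a reconstruction pass that slices the string along those spans.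
import Mathlib
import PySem

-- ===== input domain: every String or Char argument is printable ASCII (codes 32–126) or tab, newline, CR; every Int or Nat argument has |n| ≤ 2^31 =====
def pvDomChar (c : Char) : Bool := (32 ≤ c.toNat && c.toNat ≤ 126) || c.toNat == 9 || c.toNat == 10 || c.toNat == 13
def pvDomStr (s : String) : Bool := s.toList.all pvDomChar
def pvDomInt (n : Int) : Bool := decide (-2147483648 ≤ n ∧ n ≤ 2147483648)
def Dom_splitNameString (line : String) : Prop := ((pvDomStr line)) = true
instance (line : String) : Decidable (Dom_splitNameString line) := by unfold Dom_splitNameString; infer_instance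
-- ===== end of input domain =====

-- B replaces A's on-the-fly nested scan with two staged passes: a bracket-pairing pass with an
-- explicit stack of opening-bracket positions recording top-level template spans, then a reconstruction pass
-- slicing the string along them (alternative decomposition, same O(n) cost; equal on all inputs).
-- The while/for loops are ported with a fuel counter that only makes the recursion structural;
-- each iteration advances i by 1, so the initial fuel length+1 is never exhausted.

-- ===== PORT A =====
-- while-loop of findEndOfTepmplateSpec; i, count are the Python locals (Python returns -1 on failure)
def pvFindEndLoop (cs : List Char) (fuel : Nat) (i : Nat) (count : Int) : Int :=
  match fuel with
  | 0 => -1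
  | fuel + 1 =>
    if h : i < cs.length then
      if cs[i] = '<' then pvFindEndLoop cs fuel (i + 1) (count + 1)
      else if cs[i] = '>' then
        if count - 1 = 0 then ((i : Int) + 1)
        else pvFindEndLoop cs fuel (i + 1) (count - 1)
      else pvFindEndLoop cs fuel (i + 1) count
    else -1

def findEndOfTepmplateSpec (cs : List Char) (startPos : Nat) : Int :=
  pvFindEndLoop cs cs.length (startPos + 1) 1

-- while-loop of splitNameString; slices line[a:b] / line[a:] are PySem.List.slice (exact)
def pvSplitLoopA (cs : List Char) (fuel : Nat) (parts : List String) (i start : Nat) : List String :=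
  match fuel with
  | 0 => parts
  | fuel + 1 =>
    if h : i < cs.length then
      if cs[i] = '<' then
        let parts1 := if start ≠ i then
            parts ++ [String.ofList (PySem.List.slice cs (some (start : Int)) (some (i : Int)))]
          else parts
        let inext := findEndOfTepmplateSpec cs i
        if inext = -1 then parts1
        else
          pvSplitLoopA cs fuel (parts1 ++ [String.ofList (PySem.List.slice cs (some (i : Int)) (some inext))])
            inext.toNat inext.toNat
      else pvSplitLoopA cs fuel parts (i + 1) start
    else
      if start ≠ cs.length then
        parts ++ [String.ofList (PySem.List.slice cs (some (start : Int)) none)]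
      else parts

def splitNameString (line : String) : List String :=
  pvSplitLoopA line.toList (line.toList.length + 1) [] 1 1

-- ===== PORT B =====
-- phase 1 of Source B: for i in range(1, n) pairing brackets; stack of opening-bracket positions
-- (append = push at the end, pop = remove the last, as in Python), spans in completion order
def pvScanB (cs : List Char) (fuel : Nat) (i : Nat) (stack : List Nat) (spans : List (Nat × Nat)) :
    List Nat × List (Nat × Nat) :=
  match fuel with
  | 0 => (stack, spans)
  | fuel + 1 =>
    if h : i < cs.length then
      if cs[i] = '<' then pvScanB cs fuel (i + 1) (stack ++ [i]) spans
      else if cs[i] = '>' ∧ stack ≠ [] then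
        let a := stack.getLastD 0
        let stack' := stack.dropLast
        pvScanB cs fuel (i + 1) stack' (if stack' = [] then spans ++ [(a, i + 1)] else spans)
      else pvScanB cs fuel (i + 1) stack spans
    else (stack, spans)

-- phase 2 of Source B: one span of the for-loop body; state is (parts, start)
def pvRenderStep (cs : List Char) (acc : List String × Nat) (ab : Nat × Nat) : List String × Nat :=
  ((if acc.2 ≠ ab.1 then
      acc.1 ++ [String.ofList (PySem.List.slice cs (some (acc.2 : Int)) (some (ab.1 : Int)))]
    else acc.1) ++ [String.ofList (PySem.List.slice cs (some (ab.1 : Int)) (some (ab.2 : Int)))],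
   ab.2)

def splitNameString_alt (line : String) : List String :=
  let cs := line.toList
  let st := pvScanB cs (cs.length + 1) 1 [] []
  let ps := st.2.foldl (pvRenderStep cs) ([], 1)
  match st.1 with
  | p :: _ =>
      if ps.2 ≠ p then ps.1 ++ [String.ofList (PySem.List.slice cs (some (ps.2 : Int)) (some (p : Int)))]
      else ps.1
  | [] =>
      if ps.2 ≠ cs.length then ps.1 ++ [String.ofList (PySem.List.slice cs (some (ps.2 : Int)) none)]
      else ps.1

-- ===== PRECONDITION & SPEC =====
def Spec_splitNameString (line : String) (out : List String) : Prop := out = splitNameString_alt line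
instance (line : String) (out : List String) : Decidable (Spec_splitNameString line out) := by unfold Spec_splitNameString; infer_instance

-- ===== CLAIM =====
def Claim_equal_splitNameString : Prop := ∀ (line : String), Dom_splitNameString line → Spec_splitNameString line (splitNameString line)

-- ===== LEMMAS AND PROOFS =====

-- rendering (phase 2 + tail) of a scan result, from a given (parts, start) state
def pvRender (cs : List Char) (stack : List Nat) (spans : List (Nat × Nat))
    (parts : List String) (start : Nat) : List String :=
  let ps := spans.foldl (pvRenderStep cs) (parts, start)
  match stack with
  | p :: _ =>
      if ps.2 ≠ p then ps.1 ++ [String.ofList (PySem.List.slice cs (some (ps.2 : Int)) (some (p : Int)))]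
      else ps.1
  | [] =>
      if ps.2 ≠ cs.length then ps.1 ++ [String.ofList (PySem.List.slice cs (some (ps.2 : Int)) none)]
      else ps.1

theorem pvRender_cons (cs : List Char) (stack : List Nat) (a b : Nat) (sp : List (Nat × Nat))
    (parts : List String) (start : Nat) :
    pvRender cs stack ((a, b) :: sp) parts start =
      pvRender cs stack sp
        ((if start ≠ a then
            parts ++ [String.ofList (PySem.List.slice cs (some (start : Int)) (some (a : Int)))]
          else parts) ++ [String.ofList (PySem.List.slice cs (some (a : Int)) (some (b : Int)))]) b := by
  unfold pvRender
  simp [List.foldl, pvRenderStep]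

theorem pvFindEndLoop_bounds (cs : List Char) : ∀ (fuel i : Nat) (count : Int),
    pvFindEndLoop cs fuel i count ≠ -1 →
    (i : Int) < pvFindEndLoop cs fuel i count ∧ pvFindEndLoop cs fuel i count ≤ (cs.length : Int) := by
  intro fuel
  induction fuel with
  | zero => intro i count hne; exact absurd rfl hne
  | succ fuel ih =>
    intro i count hne
    rw [pvFindEndLoop] at hne ⊢
    by_cases h : i < cs.length
    · simp only [dif_pos h] at hne ⊢
      by_cases h1 : cs[i] = '<'
      · simp only [if_pos h1] at hne ⊢
        have := ih (i + 1) (count + 1) hne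
        push_cast at this ⊢; omega
      · simp only [if_neg h1] at hne ⊢
        by_cases h2 : cs[i] = '>'
        · simp only [if_pos h2] at hne ⊢
          by_cases h3 : count - 1 = 0
          · simp only [if_pos h3] at hne ⊢; omega
          · simp only [if_neg h3] at hne ⊢
            have := ih (i + 1) (count - 1) hne
            push_cast at this ⊢; omega
        · simp only [if_neg h2] at hne ⊢
          have := ih (i + 1) count hne
          push_cast at this ⊢; omega
    · simp only [dif_neg h] at hne
      exact absurd rfl hne

theorem pvFindEndLoop_fuel (cs : List Char) : ∀ (f g i : Nat) (count : Int),
    cs.length - i < f → cs.length - i < g →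
    pvFindEndLoop cs f i count = pvFindEndLoop cs g i count := by
  intro f
  induction f with
  | zero => intro g i count hf; omega
  | succ f ih =>
    intro g i count hf hg
    match g, hg with
    | g + 1, hg =>
      rw [pvFindEndLoop, pvFindEndLoop]
      by_cases h : i < cs.length
      · simp only [dif_pos h]
        by_cases h1 : cs[i] = '<'
        · simp only [if_pos h1]; exact ih g (i + 1) (count + 1) (by omega) (by omega)
        · simp only [if_neg h1]
          by_cases h2 : cs[i] = '>'
          · simp only [if_pos h2]
            by_cases h3 : count - 1 = 0
            · simp only [if_pos h3]
            · simp only [if_neg h3]; exact ih g (i + 1) (count - 1) (by omega) (by omega)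
          · simp only [if_neg h2]; exact ih g (i + 1) count (by omega) (by omega)
      · simp only [dif_neg h]

theorem pvScanB_fuel (cs : List Char) : ∀ (f g i : Nat) (stack : List Nat) (spans : List (Nat × Nat)),
    cs.length - i < f → cs.length - i < g →
    pvScanB cs f i stack spans = pvScanB cs g i stack spans := by
  intro f
  induction f with
  | zero => intro g i stack spans hf; omega
  | succ f ih =>
    intro g i stack spans hf hg
    match g, hg with
    | g + 1, hg =>
      rw [pvScanB, pvScanB]
      by_cases h : i < cs.length
      · simp only [dif_pos h]
        by_cases h1 : cs[i] = '<'
        · simp only [if_pos h1]; exact ih g (i + 1) _ spans (by omega) (by omega)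
        · simp only [if_neg h1]
          by_cases h2 : cs[i] = '>' ∧ stack ≠ []
          · simp only [if_pos h2]; exact ih g (i + 1) _ _ (by omega) (by omega)
          · simp only [if_neg h2]; exact ih g (i + 1) stack spans (by omega) (by omega)
      · simp only [dif_neg h]

-- the spans accumulator only grows by appending: factor it out
theorem pvScanB_spans (cs : List Char) : ∀ (fuel i : Nat) (stack : List Nat) (spans : List (Nat × Nat)),
    pvScanB cs fuel i stack spans =
      ((pvScanB cs fuel i stack []).1, spans ++ (pvScanB cs fuel i stack []).2) := by
  intro fuel
  induction fuel with
  | zero => intro i stack spans; simp [pvScanB]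
  | succ fuel ih =>
    intro i stack spans
    rw [pvScanB]
    conv_rhs => rw [pvScanB]
    by_cases h : i < cs.length
    · simp only [dif_pos h]
      by_cases h1 : cs[i] = '<'
      · simp only [if_pos h1]; exact ih (i + 1) _ spans
      · simp only [if_neg h1]
        by_cases h2 : cs[i] = '>' ∧ stack ≠ []
        · simp only [if_pos h2]
          by_cases h3 : stack.dropLast = []
          · simp only [if_pos h3]
            rw [ih (i + 1) _ (spans ++ [(stack.getLastD 0, i + 1)]),
                ih (i + 1) _ ([] ++ [(stack.getLastD 0, i + 1)])]
            simp
          · simp only [if_neg h3]; exact ih (i + 1) _ spans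
        · simp only [if_neg h2]; exact ih (i + 1) stack spans
    · simp [dif_neg h]

-- inner correspondence: scanning with a nonempty stack behaves like A's findEnd scan with
-- count = stack.length: either the brackets never balance (no span recorded, bottom preserved)
-- or the span (bottom, end) is recorded and the scan resumes with an empty stack.
theorem pvScanB_inner (cs : List Char) : ∀ (fuel i : Nat) (s : List Nat) (spans : List (Nat × Nat)),
    s ≠ [] → cs.length - i < fuel →
    (pvFindEndLoop cs fuel i (s.length : Int) = -1 →
        (pvScanB cs fuel i s spans).2 = spans ∧ (pvScanB cs fuel i s spans).1.head? = s.head?) ∧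
    (pvFindEndLoop cs fuel i (s.length : Int) ≠ -1 →
        pvScanB cs fuel i s spans =
          pvScanB cs fuel (pvFindEndLoop cs fuel i (s.length : Int)).toNat []
            (spans ++ [(s.headD 0, (pvFindEndLoop cs fuel i (s.length : Int)).toNat)])) := by
  intro fuel
  induction fuel with
  | zero => intro i s spans hs hf; omega
  | succ fuel ih =>
    intro i s spans hs hf
    rw [pvFindEndLoop, pvScanB]
    by_cases h : i < cs.length
    · simp only [dif_pos h]
      by_cases h1 : cs[i] = '<'
      · simp only [if_pos h1]
        have hlen : (((s ++ [i]).length : Nat) : Int) = (s.length : Int) + 1 := by simp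
        have hhd : (s ++ [i]).head? = s.head? := by
          cases s with
          | nil => exact absurd rfl hs
          | cons a t => simp
        have hhdD : (s ++ [i]).headD 0 = s.headD 0 := by
          cases s with
          | nil => exact absurd rfl hs
          | cons a t => simp
        have hrec := ih (i + 1) (s ++ [i]) spans (by simp) (by omega)
        rw [hlen, hhd, hhdD] at hrec
        constructor
        · intro hne; exact hrec.1 hne
        · intro hne
          rw [hrec.2 hne]
          have hb := pvFindEndLoop_bounds cs fuel (i + 1) ((s.length : Int) + 1) hne
          exact pvScanB_fuel cs fuel (fuel + 1) _ [] _ (by omega) (by omega)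
      · simp only [if_neg h1]
        by_cases h2 : cs[i] = '>'
        · have h2' : cs[i] = '>' ∧ s ≠ [] := ⟨h2, hs⟩
          simp only [if_pos h2, if_pos h2']
          by_cases h3 : s.length = 1
          · -- stack empties: span recorded, findEnd returns i+1
            have hdrop : s.dropLast = [] := by
              cases s with
              | nil => exact absurd rfl hs
              | cons a t => cases t with
                | nil => rfl
                | cons b u => simp at h3
            have hlast : s.getLastD 0 = s.headD 0 := by
              cases s with
              | nil => exact absurd rfl hs
              | cons a t => cases t with
                | nil => rfl
                | cons b u => simp at h3
            have hz : ((s.length : Int)) - 1 = 0 := by omega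
            simp only [if_pos hz, hdrop, hlast]
            constructor
            · intro hne; exact absurd hne (by omega)
            · intro _
              have ht : ((i : Int) + 1).toNat = i + 1 := by omega
              simp only [ht]
              exact pvScanB_fuel cs fuel (fuel + 1) (i + 1) [] _ (by omega) (by omega)
          · -- stack shrinks but stays nonempty
            have hdrop : s.dropLast ≠ [] := by
              intro hd
              have hlem := congrArg List.length hd
              have h0 : 0 < s.length := List.length_pos_of_ne_nil hs
              simp [List.length_dropLast] at hlem
              omega
            have hlen : ((s.dropLast.length : Nat) : Int) = (s.length : Int) - 1 := by
              have h0 : 0 < s.length := List.length_pos_of_ne_nil hs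
              simp [List.length_dropLast]; omega
            have hhd : s.dropLast.head? = s.head? := by
              cases s with
              | nil => exact absurd rfl hs
              | cons a t => cases t with
                | nil => simp at h3
                | cons b u => simp [List.dropLast]
            have hhdD : s.dropLast.headD 0 = s.headD 0 := by
              cases s with
              | nil => exact absurd rfl hs
              | cons a t => cases t with
                | nil => simp at h3
                | cons b u => simp [List.dropLast]
            have hz : ¬ ((s.length : Int)) - 1 = 0 := by
              have h0 : 0 < s.length := List.length_pos_of_ne_nil hs
              omega
            simp only [if_neg hz, if_neg hdrop]
            have hrec := ih (i + 1) s.dropLast spans hdrop (by omega)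
            rw [hlen, hhd, hhdD] at hrec
            constructor
            · intro hne; exact hrec.1 hne
            · intro hne
              rw [hrec.2 hne]
              have hb := pvFindEndLoop_bounds cs fuel (i + 1) ((s.length : Int) - 1) hne
              exact pvScanB_fuel cs fuel (fuel + 1) _ [] _ (by omega) (by omega)
        · have h2' : ¬ (cs[i] = '>' ∧ s ≠ []) := by intro hc; exact h2 hc.1
          simp only [if_neg h2, if_neg h2']
          have hrec := ih (i + 1) s spans hs (by omega)
          constructor
          · intro hne; exact hrec.1 hne
          · intro hne
            rw [hrec.2 hne]
            have hb := pvFindEndLoop_bounds cs fuel (i + 1) (s.length : Int) hne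
            exact pvScanB_fuel cs fuel (fuel + 1) _ [] _ (by omega) (by omega)
    · simp only [dif_neg h]
      constructor
      · intro _
        constructor
        · trivial
        · trivial
      · intro hne; exact absurd rfl hne

-- main correspondence: A's loop at top level equals the render of B's scan from the same index
theorem pvSplit_eq (cs : List Char) : ∀ (fuel : Nat) (parts : List String) (i start : Nat),
    cs.length - i < fuel →
    pvSplitLoopA cs fuel parts i start =
      pvRender cs (pvScanB cs fuel i [] []).1 (pvScanB cs fuel i [] []).2 parts start := by
  intro fuel
  induction fuel with
  | zero => intro parts i start hf; omega
  | succ fuel ih =>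
    intro parts i start hf
    rw [pvSplitLoopA]
    by_cases h : i < cs.length
    · simp only [dif_pos h]
      by_cases h1 : cs[i] = '<'
      · simp only [if_pos h1]
        have hscan : pvScanB cs (fuel + 1) i [] [] = pvScanB cs fuel (i + 1) [i] [] := by
          rw [pvScanB]
          simp [dif_pos h, if_pos h1]
        rw [hscan]
        have hinner := pvScanB_inner cs fuel (i + 1) [i] [] (by simp) (by omega)
        simp only [List.length_cons, List.length_nil, Nat.zero_add, Nat.cast_one,
          List.head?_cons, List.headD_cons] at hinner
        have hfe : findEndOfTepmplateSpec cs i = pvFindEndLoop cs fuel (i + 1) 1 := by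
          unfold findEndOfTepmplateSpec
          exact pvFindEndLoop_fuel cs cs.length fuel (i + 1) 1 (by omega) (by omega)
        rw [hfe]
        by_cases hne : pvFindEndLoop cs fuel (i + 1) 1 = -1
        · simp only [if_pos hne]
          obtain ⟨hsp, hhd⟩ := hinner.1 hne
          rw [hsp]
          cases hst : (pvScanB cs fuel (i + 1) [i] []).1 with
          | nil => rw [hst] at hhd; simp at hhd
          | cons p t =>
            rw [hst] at hhd
            simp only [List.head?_cons, Option.some.injEq] at hhd
            subst hhd
            unfold pvRender
            simp [List.foldl]
        · simp only [if_neg hne]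
          have hb := pvFindEndLoop_bounds cs fuel (i + 1) 1 hne
          set j := (pvFindEndLoop cs fuel (i + 1) 1).toNat with hj
          have hji : (pvFindEndLoop cs fuel (i + 1) 1) = (j : Int) := by omega
          rw [hinner.2 hne]
          simp only [List.nil_append]
          rw [pvScanB_spans cs fuel j [] [(i, j)]]
          simp only [List.singleton_append]
          rw [hji, pvRender_cons]
          exact ih _ j j (by omega)
      · simp only [if_neg h1]
        have hscan : pvScanB cs (fuel + 1) i [] [] = pvScanB cs fuel (i + 1) [] [] := by
          rw [pvScanB]
          simp [dif_pos h, if_neg h1]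
        rw [hscan]
        exact ih parts (i + 1) start (by omega)
    · simp only [dif_neg h]
      have hscan : pvScanB cs (fuel + 1) i [] [] = ([], []) := by
        rw [pvScanB]; simp [dif_neg h]
      rw [hscan]
      unfold pvRender
      simp [List.foldl]

-- ===== VERDICT =====
theorem splitNameString_spec : Claim_equal_splitNameString := by
  intro line _
  unfold Spec_splitNameString splitNameString splitNameString_alt
  rw [pvSplit_eq line.toList (line.toList.length + 1) [] 1 1 (by omega)]
  rfl
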